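-- pv_equiv track=rewrite | github.com/sirzzang/Python-Coding-Practice | BOJ/08_수학1/2775_수학1_코드작성.py | apartment
-- ===== SOURCE A (Python) =====
-- dictionary = {}                # 메모 저장할 dictionary, key는 tuple로 넣을 것.
--
-- def apartment(k, n):           # 인자로 k층, n호 받는다.
--     if (k, n) in dictionary:   # k층 n호 key가 있으면 그거 꺼내와라.
--         return dictionary[(k,n)]
--     if n == 1:
--         return 1                # 1호 층 무관 1명
--     elif k == 0:
--         return n                # 0층 n명
--     else:
--         result = apartment(k-1, n) + apartment(k, n-1) # 바로 아래층 n호 + 왼쪽, 재귀 호출.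
--         dictionary[(k,n)] = result                     # 결과값 메모
--         return result
-- ===== SOURCE B (Python) =====
-- def apartment(k, n):
--     # Closed-form: apartment(k, n) = C(n + k, k + 1), computed as a running
--     # product of exact integer steps; no recursion, no memo table.
--     result = 1
--     for i in range(1, k + 2):
--         result = result * (n - 1 + i) // i
--     return result
-- ===== Notes on version B (the rewrite author's own statement) =====
-- stated objective: faster
-- what changed: replaces the memoised two-variable Pascal recursion with the closed-form binomial coefficient C(n+k, k+1) computed by a single k+1-step exact product loop
import Mathlib
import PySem

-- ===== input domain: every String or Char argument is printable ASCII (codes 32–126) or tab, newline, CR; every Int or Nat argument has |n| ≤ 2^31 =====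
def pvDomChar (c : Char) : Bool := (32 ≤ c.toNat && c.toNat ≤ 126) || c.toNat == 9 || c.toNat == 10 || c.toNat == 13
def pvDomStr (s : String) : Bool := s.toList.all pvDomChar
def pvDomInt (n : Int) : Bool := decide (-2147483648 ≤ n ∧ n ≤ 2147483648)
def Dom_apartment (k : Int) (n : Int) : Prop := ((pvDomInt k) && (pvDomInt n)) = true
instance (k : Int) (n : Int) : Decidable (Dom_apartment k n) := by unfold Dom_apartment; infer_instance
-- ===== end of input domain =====

-- B replaces A's memoised Pascal recursion by the closed-form binomial product C(n+k, k+1)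
-- (faster, O(k) instead of O(k*n)); A also fills a module-level memo dict, B has no side effects;
-- the claim is about the return value only.


-- ===== PORT A =====
-- Literal port of A's recursion, including the module-level memo dictionary, which is
-- threaded through the recursion as state (each top-level call starts from the empty
-- cache; the cache only ever holds values of the same pure recursion, so a persistent
-- cache returns the same values).  The `k < 1 ∨ n < 1` guard marks exactly the inputs
-- where the Python recursion never terminates (RecursionError); excluded by Pre_apartment.
def apartmentGo (memo : PySem.Dict (Int × Int) Int) (k : Int) (n : Int) :
    Int × PySem.Dict (Int × Int) Int :=
  match memo.get? (k, n) with
  | some v => (v, memo)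
  | none =>
    if n = 1 then (1, memo)
    else if k = 0 then (n, memo)
    else if k < 1 ∨ n < 1 then (0, memo)   -- Python A does not terminate here (outside Pre_)
    else
      let p := apartmentGo memo (k - 1) n
      let q := apartmentGo p.2 k (n - 1)
      (p.1 + q.1, q.2.insert (k, n) (p.1 + q.1))
termination_by (k.toNat + n.toNat)
decreasing_by
  · omega
  · omega

def apartment (k : Int) (n : Int) : Int := (apartmentGo PySem.Dict.empty k n).1

-- ===== PORT B =====
def apartment_alt (k : Int) (n : Int) : Int :=
  (PySem.List.pyRange 1 (k + 2) 1).foldl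
    (fun result i => PySem.Int.floordiv (result * (n - 1 + i)) i) 1

-- ===== PRECONDITION & SPEC =====
-- Pre_ excludes exactly the inputs where A's recursion never returns (RecursionError):
-- whenever n ≠ 1, k ≠ 0 and not both k ≥ 1, n ≥ 1, the recursion diverges.
def Pre_apartment (k : Int) (n : Int) : Prop := n = 1 ∨ k = 0 ∨ (1 ≤ k ∧ 1 ≤ n)
instance (k : Int) (n : Int) : Decidable (Pre_apartment k n) := by unfold Pre_apartment; infer_instance
def pvWitness_apartment : Int × Int := (3, 4)

def Spec_apartment (k : Int) (n : Int) (out : Int) : Prop := out = apartment_alt k n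
instance (k : Int) (n : Int) (out : Int) : Decidable (Spec_apartment k n out) := by unfold Spec_apartment; infer_instance

-- ===== CLAIM (what is proved, stated in full; the proofs are below) =====
def Claim_equal_apartment : Prop := ∀ (k : Int) (n : Int), Dom_apartment k n → Pre_apartment k n → Spec_apartment k n (apartment k n)

-- ===== LEMMAS AND PROOFS =====

-- The value A's recursion computes on 1 ≤ k, 1 ≤ n: the binomial coefficient C(n+k, k+1).
def apartmentVal (k : Int) (n : Int) : Int :=
  (((n - 1).toNat + k.toNat + 1).choose (k.toNat + 1) : Int)

theorem apartmentVal_nat (kk m : Nat) :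
    apartmentVal (kk : Int) ((m : Int) + 1) = ((m + kk + 1).choose (kk + 1) : Int) := by
  unfold apartmentVal
  rw [show ((m : Int) + 1 - 1).toNat = m from by omega, show ((kk : Int)).toNat = kk from by omega]

theorem apartmentVal_one (k : Int) : apartmentVal k 1 = 1 := by
  unfold apartmentVal
  rw [show ((1 : Int) - 1).toNat = 0 from rfl]
  simp [Nat.choose_self]

theorem apartmentVal_zero (n : Int) (hn : 1 ≤ n) : apartmentVal 0 n = n := by
  unfold apartmentVal
  rw [show ((0 : Int)).toNat = 0 from rfl]
  simp [Nat.choose_one_right]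
  omega

theorem apartmentVal_pascal (k n : Int) (hk : 1 ≤ k) (hn : 2 ≤ n) :
    apartmentVal k n = apartmentVal (k - 1) n + apartmentVal k (n - 1) := by
  obtain ⟨kk, rfl⟩ : ∃ kk : Nat, k = (kk : Int) + 1 := ⟨(k - 1).toNat, by omega⟩
  obtain ⟨m, rfl⟩ : ∃ m : Nat, n = (m : Int) + 1 + 1 := ⟨(n - 2).toNat, by omega⟩
  rw [show ((kk : Int) + 1 - 1) = (kk : Int) from by ring,
      show ((m : Int) + 1 + 1 - 1) = (m : Int) + 1 from by ring]
  rw [show ((m : Int) + 1 + 1) = (((m + 1 : Nat) : Int) + 1) from by push_cast; ring,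
      show ((kk : Int) + 1) = (((kk + 1 : Nat) : Int)) from by push_cast; ring]
  rw [apartmentVal_nat, apartmentVal_nat, apartmentVal_nat]
  rw [show (m + 1) + (kk + 1) + 1 = ((m + 1 + kk + 1) + 1) from by omega,
      show m + (kk + 1) + 1 = m + 1 + kk + 1 from by omega,
      show kk + 1 + 1 = (kk + 1) + 1 from rfl]
  rw [Nat.choose_succ_succ (m + 1 + kk + 1) (kk + 1)]
  push_cast
  ring

-- Invariant of the memo cache: every entry records the binomial value at its key.
def GoodMemo (memo : PySem.Dict (Int × Int) Int) : Prop :=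
  ∀ k n v, memo.get? (k, n) = some v → 1 ≤ k ∧ 2 ≤ n ∧ v = apartmentVal k n

theorem apartmentGo_correct (N : Nat) (k n : Int) (memo : PySem.Dict (Int × Int) Int)
    (hN : k.toNat + n.toNat = N) (hg : GoodMemo memo) :
    GoodMemo (apartmentGo memo k n).2 ∧
      (1 ≤ k → 1 ≤ n → (apartmentGo memo k n).1 = apartmentVal k n) ∧
      (n = 1 → (apartmentGo memo k n).1 = 1) ∧
      (k = 0 → (apartmentGo memo k n).1 = n) := by
  induction N using Nat.strong_induction_on generalizing k n memo with
  | _ N ih =>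
    rw [apartmentGo]
    cases h : memo.get? (k, n) with
    | some v =>
        obtain ⟨hk, hn, hv⟩ := hg k n v h
        exact ⟨hg, fun _ _ => hv, fun h1 => by omega, fun h0 => by omega⟩
    | none =>
        by_cases hn1 : n = 1
        · simp only [if_pos hn1]
          exact ⟨hg, fun _ _ => by rw [hn1, apartmentVal_one], fun _ => by simp, fun h0 => by omega⟩
        · simp only [if_neg hn1]
          by_cases hk0 : k = 0
          · simp only [if_pos hk0]
            exact ⟨hg, fun hk _ => by omega, fun h1 => by omega, fun _ => by simp⟩
          · simp only [if_neg hk0]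
            by_cases hbad : k < 1 ∨ n < 1
            · simp only [if_pos hbad]
              exact ⟨hg, fun hk hn => by omega, fun h1 => by omega, fun h0 => by omega⟩
            · simp only [if_neg hbad]
              have hk : 1 ≤ k := by omega
              have hn : 2 ≤ n := by omega
              obtain ⟨hg1, hv1, ho1, hz1⟩ :=
                ih ((k - 1).toNat + n.toNat) (by omega) (k - 1) n memo rfl hg
              obtain ⟨hg2, hv2, ho2, hz2⟩ :=
                ih (k.toNat + (n - 1).toNat) (by omega) k (n - 1)
                  (apartmentGo memo (k - 1) n).2 rfl hg1
              have hp : (apartmentGo memo (k - 1) n).1 = apartmentVal (k - 1) n := by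
                by_cases hk1 : k = 1
                · rw [hz1 (by omega), hk1]
                  rw [show (1 : Int) - 1 = 0 from rfl, apartmentVal_zero n (by omega)]
                · exact hv1 (by omega) (by omega)
              have hq : (apartmentGo (apartmentGo memo (k - 1) n).2 k (n - 1)).1
                  = apartmentVal k (n - 1) := by
                by_cases hn2 : n = 2
                · rw [ho2 (by omega), hn2]
                  rw [show (2 : Int) - 1 = 1 from rfl, apartmentVal_one]
                · exact hv2 (by omega) (by omega)
              have hsum : (apartmentGo memo (k - 1) n).1
                    + (apartmentGo (apartmentGo memo (k - 1) n).2 k (n - 1)).1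
                  = apartmentVal k n := by
                rw [hp, hq, apartmentVal_pascal k n hk hn]
              refine ⟨?_, fun _ _ => hsum, fun h1 => by omega, fun h0 => by omega⟩
              intro k' n' v' hget
              by_cases hkey : (k', n') = (k, n)
              · injection hkey with h1 h2
                subst h1; subst h2
                rw [PySem.Dict.get?_insert_self] at hget
                injection hget with hv
                exact ⟨hk, hn, by rw [← hv]; exact hsum⟩
              · rw [PySem.Dict.get?_insert_of_ne _ _ hkey] at hget
                exact hg2 k' n' v' hget

theorem goodMemo_empty : GoodMemo PySem.Dict.empty := by
  intro k n v h
  simp [PySem.Dict.empty, PySem.Dict.get?] at h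

-- B's product loop computes the binomial coefficient C(m + kk + 1, kk + 1) (n = m + 1 ≥ 1).
theorem apartment_alt_eq_choose (kk m : Nat) :
    apartment_alt (kk : Int) ((m : Int) + 1) = ((m + kk + 1).choose (kk + 1) : Int) := by
  induction kk with
  | zero =>
      unfold apartment_alt
      rw [show ((0 : Nat) : Int) + 2 = 1 + 1 from by norm_num, PySem.List.pyRange_one_singleton]
      simp only [List.foldl, one_mul]
      rw [PySem.Int.floordiv_eq_ediv_of_pos (by omega), Int.ediv_one]
      simp [Nat.choose_one_right]
  | succ j ih =>
      have hsplit : PySem.List.pyRange 1 ((j : Int) + 1 + 2) 1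
          = PySem.List.pyRange 1 ((j : Int) + 2) 1 ++ [(j : Int) + 2] := by
        have := PySem.List.pyRange_one_succ_right (a := 1) (b := (j : Int) + 2) (by omega)
        simpa [add_assoc, add_comm, add_left_comm] using this
      have hfold : apartment_alt ((j : Int) + 1) ((m : Int) + 1)
          = PySem.Int.floordiv
              (apartment_alt (j : Int) ((m : Int) + 1) * ((m : Int) + 1 - 1 + ((j : Int) + 2)))
              ((j : Int) + 2) := by
        simp [apartment_alt, hsplit, List.foldl_append]
      have hmul : ((m + j + 1).choose (j + 1) : Int) * ((m : Int) + 1 - 1 + ((j : Int) + 2))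
          = ((m + j + 2).choose (j + 2) : Int) * ((j : Int) + 2) := by
        have h := Nat.add_one_mul_choose_eq (m + j + 1) (j + 1)
        -- (m+j+2) * C(m+j+1, j+1) = C(m+j+2, j+2) * (j+2)
        have h' : (m + j + 2) * (m + j + 1).choose (j + 1)
            = (m + j + 2).choose (j + 2) * (j + 2) := by
          simpa [Nat.succ_eq_add_one, add_assoc, add_comm, add_left_comm] using h
        push_cast at h' ⊢
        linarith [h']
      have : apartment_alt ((j + 1 : Nat) : Int) ((m : Int) + 1)
          = PySem.Int.floordiv (((m + j + 2).choose (j + 2) : Int) * ((j : Int) + 2)) ((j : Int) + 2) := by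
        push_cast
        rw [hfold, ih, hmul]
      rw [this]
      rw [PySem.Int.floordiv_eq_ediv_of_pos (by omega)]
      rw [Int.mul_ediv_cancel _ (by omega)]
      ring_nf

theorem alt_neg_k (k n : Int) (hk : k < 0) : apartment_alt k n = 1 := by
  unfold apartment_alt
  rw [PySem.List.pyRange_one_eq_nil (by omega)]
  rfl

theorem alt_k_zero (n : Int) : apartment_alt 0 n = n := by
  unfold apartment_alt
  rw [show (0 : Int) + 2 = 1 + 1 from rfl, PySem.List.pyRange_one_singleton]
  simp only [List.foldl, one_mul]
  rw [PySem.Int.floordiv_eq_ediv_of_pos (by omega), Int.ediv_one]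
  ring

-- ===== VERDICT (by name: the statement is the Claim_ definition above) =====
theorem apartment_spec : Claim_equal_apartment := by
  intro k n _ hpre
  unfold Spec_apartment
  unfold apartment
  obtain ⟨-, hval, hone, hzero⟩ :=
    apartmentGo_correct (k.toNat + n.toNat) k n PySem.Dict.empty rfl goodMemo_empty
  rcases hpre with hn1 | hk0 | ⟨hk, hn⟩
  · subst hn1
    rw [hone rfl]
    by_cases hk : k < 0
    · rw [alt_neg_k k 1 hk]
    · obtain ⟨kk, rfl⟩ : ∃ kk : Nat, k = (kk : Int) := ⟨k.toNat, by omega⟩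
      have h := apartment_alt_eq_choose kk 0
      simp only [Nat.cast_zero, zero_add, Nat.choose_self, Nat.cast_one] at h
      rw [h]
  · subst hk0
    rw [hzero rfl, alt_k_zero]
  · rw [hval hk hn]
    obtain ⟨kk, rfl⟩ : ∃ kk : Nat, k = (kk : Int) := ⟨k.toNat, by omega⟩
    obtain ⟨m, rfl⟩ : ∃ m : Nat, n = (m : Int) + 1 := ⟨(n - 1).toNat, by omega⟩
    rw [apartment_alt_eq_choose, apartmentVal_nat]
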